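-- pv_equiv track=rewrite | github.com/ChenShizhe/paper-reader | paper-reader/scripts/expand_macros.py | _macro_dependencies
-- ===== SOURCE A (Python) =====
-- def _skip_comment(text: str, idx: int) -> int:
--     if idx < len(text) and text[idx] == "%":
--         while idx < len(text) and text[idx] != "\n":
--             idx += 1
--     return idx
--
-- def _read_control_word(text: str, idx: int) -> tuple[str, int]:
--     """Reads a TeX control sequence starting at a backslash."""
--     if idx >= len(text) or text[idx] != "\\":
--         return "", idx
--     idx += 1
--     if idx >= len(text):
--         return "", idx
--     if not (text[idx].isalpha() or text[idx] == "@"):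
--         # Control symbol like \{ or \% — treat as 1-char name.
--         return text[idx], idx + 1
--     start = idx
--     while idx < len(text) and (text[idx].isalpha() or text[idx] == "@"):
--         idx += 1
--     return text[start:idx], idx
--
-- def _macro_dependencies(template: str, candidates: set[str]) -> set[str]:
--     deps: set[str] = set()
--     idx = 0
--     while idx < len(template):
--         if template[idx] == "%":
--             idx = _skip_comment(template, idx)
--             continue
--         if template[idx] != "\\":
--             idx += 1
--             continue
--         name, after = _read_control_word(template, idx)
--         idx = after
--         if name in candidates:
--             deps.add(name)
--     return deps
-- ===== SOURCE B (Python) =====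
-- import re
--
-- # One token scan: a comment swallows to end of line; otherwise a backslash
-- # starts a control word (letters/@), a single-char control symbol, or an
-- # empty name when the backslash is the last character.
-- _TOKEN = re.compile(r"%[^\n]*|\\([a-zA-Z@]+|[\s\S]?)")
--
-- def _macro_dependencies(template: str, candidates: set) -> set:
--     deps = set()
--     for m in _TOKEN.finditer(template):
--         name = m.group(1)
--         if name is not None and name in candidates:
--             deps.add(name)
--     return deps
-- ===== Notes on version B (the rewrite author's own statement) =====
-- stated objective: idiomatic
-- what changed: Replaces A's index-driven while loop with two helper readers (_skip_comment, _read_control_word) by a single compiled regex that alternates a comment token and a control-sequence token and collects the group-1 names found in candidates.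
import Mathlib
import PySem

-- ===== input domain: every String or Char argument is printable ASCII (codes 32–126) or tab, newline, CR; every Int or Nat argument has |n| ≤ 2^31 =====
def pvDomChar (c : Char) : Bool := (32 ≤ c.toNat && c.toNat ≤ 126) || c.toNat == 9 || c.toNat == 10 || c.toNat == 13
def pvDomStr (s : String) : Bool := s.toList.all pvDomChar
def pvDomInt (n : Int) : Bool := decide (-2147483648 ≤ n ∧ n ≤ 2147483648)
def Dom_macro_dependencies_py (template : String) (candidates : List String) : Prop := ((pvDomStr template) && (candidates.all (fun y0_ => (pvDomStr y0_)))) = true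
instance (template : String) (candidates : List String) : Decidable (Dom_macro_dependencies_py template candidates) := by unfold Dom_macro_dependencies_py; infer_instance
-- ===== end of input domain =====

-- B replaces A's index-driven while loop and two helper readers by a single
-- regex-style token scan (comment token | control-sequence token); objective: idiomatic.

-- ===== PORT A =====

-- while idx < len(text) and text[idx] != "\n": idx += 1   (inner loop of _skip_comment)
def skipCommentLoop (text : List Char) (idx : Nat) : Nat :=
  if _h : idx < text.length ∧ text[idx]! ≠ '\n' then skipCommentLoop text (idx + 1) else idx
termination_by text.length - idx
decreasing_by omega

def skipComment (text : List Char) (idx : Nat) : Nat :=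
  if idx < text.length ∧ text[idx]! = '%' then skipCommentLoop text idx else idx

-- while idx < len(text) and (text[idx].isalpha() or text[idx] == "@"): idx += 1
-- (Char.isAlpha = Python's isalpha on the ASCII domain)
def readWordLoop (text : List Char) (idx : Nat) : Nat :=
  if _h : idx < text.length ∧ ((text[idx]!).isAlpha ∨ text[idx]! = '@') then readWordLoop text (idx + 1) else idx
termination_by text.length - idx
decreasing_by omega

-- _read_control_word; text[start:idx] with 0 ≤ start ≤ idx ≤ len is (drop start).take (idx-start)
def readControlWord (text : List Char) (idx : Nat) : String × Nat :=
  if ¬ (idx < text.length ∧ text[idx]! = '\\') then ("", idx)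
  else
    let i1 := idx + 1
    if i1 ≥ text.length then ("", i1)
    else if ¬ ((text[i1]!).isAlpha ∨ text[i1]! = '@') then (String.ofList [text[i1]!], i1 + 1)
    else
      let e := readWordLoop text i1
      (String.ofList ((text.drop i1).take (e - i1)), e)

theorem skipCommentLoop_ge (text : List Char) (idx : Nat) : idx ≤ skipCommentLoop text idx := by
  unfold skipCommentLoop
  split
  · have := skipCommentLoop_ge text (idx + 1); omega
  · omega
termination_by text.length - idx
decreasing_by omega

theorem readWordLoop_ge (text : List Char) (idx : Nat) : idx ≤ readWordLoop text idx := by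
  unfold readWordLoop
  split
  · have := readWordLoop_ge text (idx + 1); omega
  · omega
termination_by text.length - idx
decreasing_by omega

theorem skipComment_gt (text : List Char) (idx : Nat)
    (h1 : idx < text.length) (h2 : text[idx]! = '%') : idx < skipComment text idx := by
  unfold skipComment
  rw [if_pos ⟨h1, h2⟩]
  rw [skipCommentLoop]
  rw [dif_pos ⟨h1, by rw [h2]; decide⟩]
  have := skipCommentLoop_ge text (idx + 1); omega

theorem readControlWord_gt (text : List Char) (idx : Nat)
    (h1 : idx < text.length) (h2 : text[idx]! = '\\') : idx < (readControlWord text idx).2 := by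
  unfold readControlWord
  rw [if_neg (not_not_intro ⟨h1, h2⟩)]
  simp only
  split
  · omega
  · split
    · omega
    · have := readWordLoop_ge text (idx + 1); simp only []; omega

-- the main while loop of _macro_dependencies
def aLoop (text : List Char) (cands : List String) (idx : Nat) (deps : PySem.Set String) : PySem.Set String :=
  if h : idx < text.length then
    if hp : text[idx]! = '%' then aLoop text cands (skipComment text idx) deps
    else if hb : text[idx]! ≠ '\\' then aLoop text cands (idx + 1) deps
    else
      let nw := readControlWord text idx
      aLoop text cands nw.2 (if nw.1 ∈ cands then deps.add nw.1 else deps)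
  else deps
termination_by text.length - idx
decreasing_by
  · have := skipComment_gt text idx h hp; omega
  · omega
  · have := readControlWord_gt text idx h (not_not.mp hb); omega

def macro_dependencies_py (template : String) (candidates : List String) : List String :=
  aLoop template.toList candidates 0 PySem.Set.empty

-- ===== PORT B =====

-- one pass over the text, consuming one regex token per step:
--   %[^\n]*  (comment, no group)  |  \\([a-zA-Z@]+|[\s\S]?)  (control sequence, group = name)
-- and at a position where neither alternative matches, the scanner moves on one char.
def bScan : List Char → List String → PySem.Set String → PySem.Set String
  | [], _, deps => deps
  | c :: rest, cands, deps =>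
    if c = '%' then bScan (rest.dropWhile (· ≠ '\n')) cands deps
    else if c = '\\' then
      let word := rest.takeWhile (fun c => c.isAlpha || c == '@')
      if word = [] then
        match rest with
        | [] => if "" ∈ cands then deps.add "" else deps
        | c' :: rest' => bScan rest' cands (if String.ofList [c'] ∈ cands then deps.add (String.ofList [c']) else deps)
      else bScan (rest.drop word.length) cands (if String.ofList word ∈ cands then deps.add (String.ofList word) else deps)
    else bScan rest cands deps
termination_by cs _ _ => cs.length
decreasing_by
  all_goals simp only [List.length_cons, List.length_drop]
  · exact Nat.lt_succ_of_le (List.length_dropWhile_le _ _)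
  all_goals omega

def macro_dependencies_py_alt (template : String) (candidates : List String) : List String :=
  bScan template.toList candidates PySem.Set.empty

-- ===== PRECONDITION & SPEC =====
def Spec_macro_dependencies_py (template : String) (candidates : List String) (out : List String) : Prop := out = macro_dependencies_py_alt template candidates
instance (template : String) (candidates : List String) (out : List String) : Decidable (Spec_macro_dependencies_py template candidates out) := by unfold Spec_macro_dependencies_py; infer_instance

-- ===== CLAIM (what is proved, stated in full; the proofs are below) =====
def Claim_equal_macro_dependencies_py : Prop := ∀ (template : String) (candidates : List String), Dom_macro_dependencies_py template candidates → Spec_macro_dependencies_py template candidates (macro_dependencies_py template candidates)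

-- ===== LEMMAS AND PROOFS =====

theorem take_len_takeWhile (l : List Char) (p : Char → Bool) :
    l.take (l.takeWhile p).length = l.takeWhile p := by
  obtain ⟨t, ht⟩ := List.takeWhile_prefix (l := l) (p := p)
  calc l.take (l.takeWhile p).length
      = (l.takeWhile p ++ t).take (l.takeWhile p).length := by rw [ht]
    _ = l.takeWhile p := List.take_left

theorem drop_skipCommentLoop (text : List Char) (idx : Nat) :
    text.drop (skipCommentLoop text idx) = (text.drop idx).dropWhile (· ≠ '\n') := by
  rw [skipCommentLoop]
  split
  case isTrue h =>
    rw [drop_skipCommentLoop text (idx + 1)]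
    rw [List.drop_eq_getElem_cons h.1, List.dropWhile_cons]
    have hne : text[idx] ≠ '\n' := by rw [← getElem!_pos text idx h.1]; exact h.2
    simp [hne]
  case isFalse h =>
    rcases Nat.lt_or_ge idx text.length with hlt | hge
    · have heq : text[idx]! = '\n' := by
        by_contra hc; exact h ⟨hlt, hc⟩
      rw [List.drop_eq_getElem_cons hlt, List.dropWhile_cons]
      rw [getElem!_pos text idx hlt] at heq
      simp [heq]
    · rw [List.drop_eq_nil_of_le hge]
      simp
termination_by text.length - idx
decreasing_by omega

theorem readWordLoop_eq (text : List Char) (idx : Nat) :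
    readWordLoop text idx =
      idx + ((text.drop idx).takeWhile (fun c => c.isAlpha || c == '@')).length := by
  rw [readWordLoop]
  split
  case isTrue h =>
    rw [readWordLoop_eq text (idx + 1)]
    rw [List.drop_eq_getElem_cons h.1, List.takeWhile_cons]
    have hp : (text[idx].isAlpha || text[idx] == '@') = true := by
      have h2 := h.2
      rw [getElem!_pos text idx h.1] at h2
      rcases h2 with h2 | h2 <;> simp [h2]
    simp only [hp, if_true, List.length_cons]
    omega
  case isFalse h =>
    rcases Nat.lt_or_ge idx text.length with hlt | hge
    · have hp : (text[idx].isAlpha || text[idx] == '@') = false := by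
        by_contra hc
        simp only [Bool.not_eq_false, Bool.or_eq_true, beq_iff_eq] at hc
        exact h ⟨hlt, by rw [getElem!_pos text idx hlt]; tauto⟩
      rw [List.drop_eq_getElem_cons hlt, List.takeWhile_cons]
      simp [hp]
    · rw [List.drop_eq_nil_of_le hge]; rfl
termination_by text.length - idx
decreasing_by omega

theorem bScan_cons (cands deps : PySem.Set String) (c : Char) (rest : List Char) :
    bScan (c :: rest) cands deps =
    (if c = '%' then bScan (rest.dropWhile (· ≠ '\n')) cands deps
    else if c = '\\' then
      let word := rest.takeWhile (fun c => c.isAlpha || c == '@')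
      if word = [] then
        match rest with
        | [] => if "" ∈ cands then deps.add "" else deps
        | c' :: rest' => bScan rest' cands (if String.ofList [c'] ∈ cands then deps.add (String.ofList [c']) else deps)
      else bScan (rest.drop word.length) cands (if String.ofList word ∈ cands then deps.add (String.ofList word) else deps)
    else bScan rest cands deps) := by
  rw [bScan.eq_def]

theorem aLoop_eq_bScan (text : List Char) (cands : List String) (idx : Nat) (deps : PySem.Set String) :
    aLoop text cands idx deps = bScan (text.drop idx) cands deps := by
  rw [aLoop]
  split
  case isFalse h =>
    rw [List.drop_eq_nil_of_le (by omega), bScan]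
  case isTrue h =>
    have hg : text[idx]! = text[idx] := getElem!_pos text idx h
    have hd : text.drop idx = text[idx] :: text.drop (idx + 1) := List.drop_eq_getElem_cons h
    rw [hd, bScan_cons]
    dsimp only
    split
    case isTrue hp =>
      -- comment token
      rw [if_pos (hg ▸ hp)]
      have hmeas := skipComment_gt text idx h hp
      rw [aLoop_eq_bScan text cands (skipComment text idx) deps]
      unfold skipComment
      rw [if_pos ⟨h, hp⟩]
      rw [skipCommentLoop]
      rw [dif_pos ⟨h, by rw [hp]; decide⟩]
      rw [drop_skipCommentLoop text (idx + 1)]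
    case isFalse hp =>
      split
      case isTrue hb =>
        -- not a token start: advance one char
        rw [if_neg (fun hc => hp (hg ▸ hc)), if_neg (fun hc => hb (hg ▸ hc))]
        exact aLoop_eq_bScan text cands (idx + 1) deps
      case isFalse hb =>
        -- control-sequence token
        have hbs : text[idx]! = '\\' := not_not.mp hb
        have hB : text[idx] = '\\' := by rw [← hg]; exact hbs
        have hP : ¬ text[idx] = '%' := by rw [← hg]; exact hp
        rw [if_neg hP, if_pos hB]
        have hmeas := readControlWord_gt text idx h hbs
        rw [aLoop_eq_bScan text cands (readControlWord text idx).2 _]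
        rcases Nat.lt_or_ge (idx + 1) text.length with hlt | hge
        · have hg1 : text[idx + 1]! = text[idx + 1] := getElem!_pos text (idx + 1) hlt
          have hd1 : text.drop (idx + 1) = text[idx + 1] :: text.drop (idx + 2) := List.drop_eq_getElem_cons hlt
          by_cases hletter : (text[idx + 1]!).isAlpha ∨ text[idx + 1]! = '@'
          · -- control word of letters
            have hpw : (text[idx + 1].isAlpha || text[idx + 1] == '@') = true := by
              have hl' := hletter; rw [hg1] at hl'
              rcases hl' with h2 | h2 <;> simp [h2]
            have hw : (text.drop (idx + 1)).takeWhile (fun c => c.isAlpha || c == '@')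
                = text[idx + 1] :: (text.drop (idx + 2)).takeWhile (fun c => c.isAlpha || c == '@') := by
              rw [hd1, List.takeWhile_cons, hpw]; simp
            have hrcw : readControlWord text idx
                = (String.ofList ((text.drop (idx + 1)).takeWhile (fun c => c.isAlpha || c == '@')),
                   idx + 1 + ((text.drop (idx + 1)).takeWhile (fun c => c.isAlpha || c == '@')).length) := by
              unfold readControlWord
              rw [if_neg (not_not_intro ⟨h, hbs⟩)]
              simp only
              rw [if_neg (by omega), if_neg (not_not_intro hletter), readWordLoop_eq text (idx + 1)]
              simp only [Nat.add_sub_cancel_left, take_len_takeWhile]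
            rw [hrcw]
            simp only
            have hwne : ¬ (List.takeWhile (fun c => c.isAlpha || c == '@') (text.drop (idx + 1)) = []) := by
              simp [hw]
            rw [if_neg hwne]
            rw [List.drop_drop]
          · -- control symbol: one char
            have hpw : (text[idx + 1].isAlpha || text[idx + 1] == '@') = false := by
              by_contra hc
              simp only [Bool.not_eq_false, Bool.or_eq_true, beq_iff_eq] at hc
              exact hletter (by rw [hg1]; tauto)
            have hw0 : (text.drop (idx + 1)).takeWhile (fun c => c.isAlpha || c == '@') = [] := by
              rw [hd1, List.takeWhile_cons, hpw]; simp
            have hrcw : readControlWord text idx = (String.ofList [text[idx + 1]], idx + 2) := by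
              unfold readControlWord
              rw [if_neg (not_not_intro ⟨h, hbs⟩)]
              simp only
              rw [if_neg (by omega), if_pos hletter, hg1]
            rw [hrcw]
            simp only
            rw [if_pos hw0, hd1]
        · -- trailing lone backslash
          have hnil : text.drop (idx + 1) = [] := List.drop_eq_nil_of_le hge
          have hrcw : readControlWord text idx = ("", idx + 1) := by
            unfold readControlWord
            rw [if_neg (not_not_intro ⟨h, hbs⟩)]
            simp only
            rw [if_pos (by omega)]
          rw [hrcw]
          simp only
          rw [hnil, List.takeWhile_nil, if_pos rfl, bScan]
termination_by text.length - idx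
decreasing_by all_goals omega

-- ===== VERDICT (by name: the statement is the Claim_ definition above) =====
theorem macro_dependencies_py_spec : Claim_equal_macro_dependencies_py := by
  intro template candidates _
  unfold Spec_macro_dependencies_py macro_dependencies_py macro_dependencies_py_alt
  simpa using aLoop_eq_bScan template.toList candidates 0 PySem.Set.empty
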